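-- pv_equiv track=rewrite | github.com/shahin217/python | Assignments/Assignment-3/Day3_Assignment.py | maxNumber_after_one_deletion
-- ===== SOURCE A (Python) =====
-- def maxNumber_after_one_deletion(n):   # Q6 largest number by deleting single digit
--     ans = 0
--     i = 1
--     while n // i > 0:
--         temp = (n // (i * 10)) * i + (n % i)
--         i *= 10
--         if temp > ans:
--             ans = temp
--     n = ans
--     return ans
-- ===== SOURCE B (Python) =====
-- def maxNumber_after_one_deletion(n):
--     # greedy: delete the first digit that is smaller than its successor (else the last digit)
--     if n < 10:
--         return 0
--     digits = []
--     m = n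
--     while m > 0:
--         digits.append(m % 10)
--         m //= 10
--     digits.reverse()
--     i = len(digits) - 1
--     for k in range(len(digits) - 1):
--         if digits[k] < digits[k + 1]:
--             i = k
--             break
--     del digits[i]
--     ans = 0
--     for d in digits:
--         ans = ans * 10 + d
--     return ans
-- ===== Notes on version B (the rewrite author's own statement) =====
-- stated objective: alternative
-- what changed: A tries every single-digit deletion arithmetically with powers of 10 and keeps the maximum; B extracts the digit list once and greedily deletes the first digit smaller than its successor (else the last digit), then rebuilds the number.
import Mathlib
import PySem

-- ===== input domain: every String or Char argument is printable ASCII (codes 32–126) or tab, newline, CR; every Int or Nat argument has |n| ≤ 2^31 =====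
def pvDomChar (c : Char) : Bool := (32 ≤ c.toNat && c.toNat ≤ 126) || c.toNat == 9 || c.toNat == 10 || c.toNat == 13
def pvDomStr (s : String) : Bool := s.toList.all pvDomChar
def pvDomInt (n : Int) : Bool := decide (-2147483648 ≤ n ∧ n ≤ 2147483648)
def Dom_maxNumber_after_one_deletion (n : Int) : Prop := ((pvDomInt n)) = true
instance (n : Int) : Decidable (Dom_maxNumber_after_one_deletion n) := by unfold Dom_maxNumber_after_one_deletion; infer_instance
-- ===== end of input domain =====

-- B replaces A's try-every-deletion arithmetic max loop by a one-shot greedy deletion on the digit list (alternative algorithm, same cost).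

-- ===== PORT A =====
-- A's while loop; the '0 < i' conjunct only makes the recursion well-founded (i starts at 1 and is only multiplied by 10, so it is always true at every reachable call).
def pvLoopA (n ans i : Int) : Int :=
  if h : 0 < i ∧ 0 < PySem.Int.floordiv n i then
    let temp := PySem.Int.floordiv n (i * 10) * i + PySem.Int.mod n i
    pvLoopA n (if temp > ans then temp else ans) (i * 10)
  else ans
termination_by (n + 1 - i).toNat
decreasing_by
  have hle : 1 * i ≤ n := (PySem.Int.le_floordiv_iff_mul_le h.1).mp h.2
  omega

def maxNumber_after_one_deletion (n : Int) : Int := pvLoopA n 0 1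

-- ===== PORT B =====
-- the digit-extraction loop: while m > 0: digits.append(m % 10); m //= 10
def pvDigitsRev (m : Int) : List Int :=
  if h : 0 < m then PySem.Int.mod m 10 :: pvDigitsRev (PySem.Int.floordiv m 10) else []
termination_by m.toNat
decreasing_by
  rw [PySem.Int.floordiv_eq_ediv_of_pos (by omega : (0:Int) < 10)]
  have h1 : m / 10 < m := by rw [Int.ediv_lt_iff_lt_mul (by omega)]; nlinarith
  have h2 : 0 ≤ m / 10 := Int.ediv_nonneg (by omega) (by omega)
  omega

-- the scan 'for k in range(len-1): if digits[k] < digits[k+1]: i = k; break' with default i = len-1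
def pvPick : List Int → Nat
  | a :: b :: t => if a < b then 0 else pvPick (b :: t) + 1
  | _ => 0

-- the rebuild loop 'for d in digits: ans = ans*10 + d'
def pvVal (ds : List Int) : Int := ds.foldl (fun a d => a * 10 + d) 0

def maxNumber_after_one_deletion_alt (n : Int) : Int :=
  if n < 10 then 0
  else
    let ds := (pvDigitsRev n).reverse
    pvVal (ds.eraseIdx (pvPick ds))

-- ===== PRECONDITION & SPEC =====
def Spec_maxNumber_after_one_deletion (n : Int) (out : Int) : Prop := out = maxNumber_after_one_deletion_alt n
instance (n : Int) (out : Int) : Decidable (Spec_maxNumber_after_one_deletion n out) := by unfold Spec_maxNumber_after_one_deletion; infer_instance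

-- ===== CLAIM (what is proved, stated in full; the proofs are below) =====
def Claim_equal_maxNumber_after_one_deletion : Prop := ∀ (n : Int), Dom_maxNumber_after_one_deletion n → Spec_maxNumber_after_one_deletion n (maxNumber_after_one_deletion n)

-- ===== LEMMAS AND PROOFS =====

-- most-significant-first value of a digit list
def pvMsval : List Int → Int
  | [] => 0
  | x :: xs => x * 10 ^ xs.length + pvMsval xs

-- all entries are decimal digits
def pvOkd (ds : List Int) : Prop := ∀ d ∈ ds, 0 ≤ d ∧ d < 10

-- candidate values: delete each single position
def pvCands (ds : List Int) : List Int := (List.range ds.length).map fun j => pvVal (ds.eraseIdx j)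

def pvMaxl (xs : List Int) : Int := xs.foldl max 0

-- reference function: M n = best value after deleting one decimal digit of n (0 when fewer than two digits)
def pvM (n : Int) : Int := if h : 10 ≤ n then max (n / 10) (10 * pvM (n / 10) + n % 10) else 0
termination_by n.toNat
decreasing_by
  have h1 : n / 10 < n := by rw [Int.ediv_lt_iff_lt_mul (by omega)]; nlinarith
  have h2 : 0 ≤ n / 10 := Int.ediv_nonneg (by omega) (by omega)
  omega

-- A's loop, started at power i, as a running max of the remaining candidates
def pvCamax (n i : Int) : Int :=
  if h : 0 < i ∧ 0 < PySem.Int.floordiv n i then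
    max (PySem.Int.floordiv n (i * 10) * i + PySem.Int.mod n i) (pvCamax n (i * 10))
  else 0
termination_by (n + 1 - i).toNat
decreasing_by
  have hle : 1 * i ≤ n := (PySem.Int.le_floordiv_iff_mul_le h.1).mp h.2
  omega

lemma pvMax_affine (x y r : Int) : 10 * max x y + r = max (10 * x + r) (10 * y + r) := by
  rcases le_total x y with h | h
  · rw [max_eq_right h, max_eq_right (by omega)]
  · rw [max_eq_left h, max_eq_left (by omega)]

lemma pvLoopA_eq_camax (n : Int) : ∀ (k : Nat) (i ans : Int), (n + 1 - i).toNat = k → 0 ≤ ans →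
    pvLoopA n ans i = max ans (pvCamax n i) := by
  intro k
  induction k using Nat.strong_induction_on with
  | _ k ih =>
    intro i ans hk hans
    rw [pvLoopA, pvCamax]
    by_cases h : 0 < i ∧ 0 < PySem.Int.floordiv n i
    · rw [dif_pos h, dif_pos h]
      have hle : 1 * i ≤ n := (PySem.Int.le_floordiv_iff_mul_le h.1).mp h.2
      have hi := h.1
      set temp := PySem.Int.floordiv n (i * 10) * i + PySem.Int.mod n i with htemp
      have hmax : (if temp > ans then temp else ans) = max ans temp := by
        rcases le_total temp ans with hc | hc
        · rw [max_eq_left hc]; split <;> omega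
        · rw [max_eq_right hc]; split <;> omega
      show pvLoopA n (if temp > ans then temp else ans) (i * 10) = max ans (max temp (pvCamax n (i * 10)))
      rw [hmax, ih (n + 1 - i * 10).toNat (by omega) (i * 10) (max ans temp) rfl (by omega)]
      rw [max_assoc]
    · rw [dif_neg h, dif_neg h]
      omega

lemma pvCamax_shift (n : Int) : ∀ (k : Nat) (i : Int), (n + 1 - i).toNat = k → 0 < i → 0 < n / (10 * i) →
    pvCamax n (10 * i) = 10 * pvCamax (n / 10) i + n % 10 := by
  intro k
  induction k using Nat.strong_induction_on with
  | _ k ih =>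
    intro i hk hi hq
    have hii : (0:Int) < 10 * i := by omega
    have hiii : (0:Int) < 10 * i * 10 := by omega
    have hi10 : (0:Int) < i * 10 := by omega
    have hn10i : 1 * (10 * i) ≤ n := (Int.le_ediv_iff_mul_le hii).mp hq
    have hn : 0 < n := by omega
    have hf1 : PySem.Int.floordiv n (10 * i) = n / (10 * i) := PySem.Int.floordiv_eq_ediv_of_pos hii
    have hf2 : PySem.Int.floordiv n (10 * i * 10) = n / (10 * i * 10) := PySem.Int.floordiv_eq_ediv_of_pos hiii
    have hm1 : PySem.Int.mod n (10 * i) = n % (10 * i) := PySem.Int.mod_eq_emod_of_pos hii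
    have hf3 : PySem.Int.floordiv (n / 10) i = n / 10 / i := PySem.Int.floordiv_eq_ediv_of_pos hi
    have hf4 : PySem.Int.floordiv (n / 10) (i * 10) = n / 10 / (i * 10) := PySem.Int.floordiv_eq_ediv_of_pos hi10
    have hm2 : PySem.Int.mod (n / 10) i = n / 10 % i := PySem.Int.mod_eq_emod_of_pos hi
    have hdd : n / 10 / i = n / (10 * i) := Int.ediv_ediv_of_nonneg (by omega)
    have e3 : 10 * i * (n / (10 * i)) + n % (10 * i) = n := Int.mul_ediv_add_emod n (10 * i)
    have e2 : i * (n / 10 / i) + n / 10 % i = n / 10 := Int.mul_ediv_add_emod (n / 10) i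
    rw [hdd] at e2
    have hE2 : n % (10 * i) = 10 * (n / 10 % i) + n % 10 := by
      have e1 : 10 * (n / 10) + n % 10 = n := by omega
      linear_combination e3 - 10 * e2 - e1
    have hE1 : n / (10 * i * 10) = n / 10 / (i * 10) := by
      rw [Int.ediv_ediv_of_nonneg (show (0:Int) ≤ 10 by omega)]
      congr 1
      ring
    have hhead : n / (10 * i * 10) * (10 * i) + n % (10 * i)
        = 10 * (n / 10 / (i * 10) * i + n / 10 % i) + n % 10 := by
      linear_combination (10 * i) * hE1 + hE2
    rw [pvCamax]
    conv_rhs => rw [pvCamax]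
    rw [dif_pos ⟨hii, by rw [hf1]; exact hq⟩, dif_pos ⟨hi, by rw [hf3, hdd]; exact hq⟩]
    rw [hf2, hm1, hf4, hm2, pvMax_affine, hhead]
    by_cases hrec : 0 < n / (10 * i * 10)
    · congr 1
      rw [show (10:Int) * i * 10 = 10 * (10 * i) from by ring,
        show i * 10 = 10 * i from by ring]
      have hrec' : 0 < n / (10 * (10 * i)) := by
        rw [show (10:Int) * (10 * i) = 10 * i * 10 from by ring]; exact hrec
      exact ih (n + 1 - 10 * i).toNat (by omega) (10 * i) rfl hii hrec'
    · have t1 : pvCamax n (10 * i * 10) = 0 := by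
        rw [pvCamax, dif_neg]
        rintro ⟨-, hc⟩
        rw [PySem.Int.floordiv_eq_ediv_of_pos hiii] at hc
        omega
      have t2 : pvCamax (n / 10) (i * 10) = 0 := by
        rw [pvCamax, dif_neg]
        rintro ⟨-, hc⟩
        rw [PySem.Int.floordiv_eq_ediv_of_pos hi10,
          Int.ediv_ediv_of_nonneg (show (0:Int) ≤ 10 by omega),
          show (10:Int) * (i * 10) = 10 * i * 10 from by ring] at hc
        omega
      rw [t1, t2, mul_zero, zero_add]
      have hq' : 0 ≤ n / 10 / (i * 10) := Int.ediv_nonneg (Int.ediv_nonneg (by omega) (by omega)) (by omega)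
      have hm' : 0 ≤ n / 10 % i := Int.emod_nonneg _ (by omega)
      have hH' : 0 ≤ n / 10 / (i * 10) * i + n / 10 % i := add_nonneg (mul_nonneg hq' hi.le) hm'
      have hr : 0 ≤ n % 10 := by omega
      rw [max_eq_left (by linarith), max_eq_left (by linarith)]

lemma pvCamax_eq_M : ∀ (k : Nat) (n : Int), n.toNat = k → pvCamax n 1 = pvM n := by
  intro k
  induction k using Nat.strong_induction_on with
  | _ k ih =>
    intro n hk
    rw [pvCamax]
    have hf1 : PySem.Int.floordiv n 1 = n := by
      rw [PySem.Int.floordiv_eq_ediv_of_pos (by omega : (0:Int) < 1), Int.ediv_one]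
    by_cases hn : 0 < n
    · rw [dif_pos ⟨by omega, by rw [hf1]; exact hn⟩]
      have hf10 : PySem.Int.floordiv n (1 * 10) = n / 10 := by
        rw [PySem.Int.floordiv_eq_ediv_of_pos (by omega : (0:Int) < 1 * 10)]
        norm_num
      have hm1 : PySem.Int.mod n 1 = 0 := by
        rw [PySem.Int.mod_eq_emod_of_pos (by omega : (0:Int) < 1), Int.emod_one]
      rw [hf10, hm1, mul_one, add_zero]
      by_cases h10 : 10 ≤ n
      · have hq : 0 < n / (10 * 1) := by
          rw [mul_one]
          omega
        have := pvCamax_shift n (n + 1 - 1).toNat 1 rfl (by omega) hq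
        rw [show (10:Int) * 1 = 1 * 10 from by ring] at this
        rw [this, ih (n / 10).toNat (by omega) (n / 10) rfl]
        conv_rhs => rw [pvM]
        rw [dif_pos h10]
      · have t0 : pvCamax n (1 * 10) = 0 := by
          rw [pvCamax, dif_neg]
          rintro ⟨-, hc⟩
          rw [PySem.Int.floordiv_eq_ediv_of_pos (by omega : (0:Int) < 1 * 10)] at hc
          norm_num at hc
          omega
        rw [t0, pvM, dif_neg h10]
        have : n / 10 = 0 := by omega
        simp [this]
    · rw [dif_neg (by rintro ⟨-, hc⟩; rw [hf1] at hc; omega), pvM, dif_neg (by omega)]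

lemma pvFoldl_val (xs : List Int) : ∀ a : Int, xs.foldl (fun a d => a * 10 + d) a = a * 10 ^ xs.length + pvMsval xs := by
  induction xs with
  | nil => intro a; simp [pvMsval]
  | cons x t ih => intro a; simp only [List.foldl_cons, ih, pvMsval, List.length_cons]; ring

lemma pvVal_eq_msval (xs : List Int) : pvVal xs = pvMsval xs := by
  simp [pvVal, pvFoldl_val]

lemma pvMsval_nonneg (ds : List Int) (h : pvOkd ds) : 0 ≤ pvMsval ds := by
  induction ds with
  | nil => simp [pvMsval]
  | cons x t ih =>
    have hx := h x (by simp)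
    have ht := ih (fun d hd => h d (by simp [hd]))
    have hp : (0:Int) ≤ 10 ^ t.length := by positivity
    simp only [pvMsval]
    nlinarith

lemma pvMsval_lt (ds : List Int) (h : pvOkd ds) : pvMsval ds < 10 ^ ds.length := by
  induction ds with
  | nil => simp [pvMsval]
  | cons x t ih =>
    have hx := h x (by simp)
    have ht := ih (fun d hd => h d (by simp [hd]))
    have hp : (0:Int) < 10 ^ t.length := by positivity
    simp only [pvMsval, List.length_cons, pow_succ]
    nlinarith

lemma pvPick_lt (ds : List Int) (h : ds ≠ []) : pvPick ds < ds.length := by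
  induction ds with
  | nil => simp at h
  | cons a t ih =>
    cases t with
    | nil => simp [pvPick]
    | cons b t' =>
      have := ih (by simp)
      simp only [pvPick, List.length_cons] at *
      split <;> omega

lemma pvOkd_eraseIdx (ds : List Int) (h : pvOkd ds) (j : Nat) : pvOkd (ds.eraseIdx j) :=
  fun d hd => h d (List.mem_of_mem_eraseIdx hd)

lemma pvGreedy_ge (ds : List Int) (h : pvOkd ds) :
    ∀ j < ds.length, pvMsval (ds.eraseIdx j) ≤ pvMsval (ds.eraseIdx (pvPick ds)) := by
  induction ds with
  | nil => intro j hj; simp at hj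
  | cons a t ih =>
    cases t with
    | nil =>
      intro j hj
      cases j with
      | zero => simp [pvPick]
      | succ k => simp at hj
    | cons b t' =>
      have htl : pvOkd (b :: t') := fun d hd => h d (by simp [hd])
      have ha := h a (by simp)
      have hb := h b (by simp)
      intro j hj
      by_cases hab : a < b
      · -- greedy deletes a; every other candidate keeps a in front and is smaller
        simp only [pvPick, if_pos hab, List.eraseIdx_zero, List.tail_cons]
        cases j with
        | zero => simp
        | succ k =>
          simp only [List.eraseIdx_cons_succ]
          have hk : k < (b :: t').length := by simpa using hj
          have hlen : ((b :: t').eraseIdx k).length = t'.length := by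
            rw [List.length_eraseIdx, if_pos hk]; simp
          have hX := pvMsval_lt _ (pvOkd_eraseIdx _ htl k)
          rw [hlen] at hX
          have hbt : b * 10 ^ t'.length + pvMsval t' ≤ pvMsval (b :: t') := by
            simp [pvMsval]
          have hp : (0:Int) < 10 ^ t'.length := by positivity
          have htnn := pvMsval_nonneg t' (fun d hd => h d (by simp [hd]))
          simp only [pvMsval, hlen]
          nlinarith
      · -- greedy deletes inside the tail; compare candidate by candidate
        have hb_le_a : b ≤ a := by omega
        simp only [pvPick, if_neg hab, List.eraseIdx_cons_succ]
        have hpick := pvPick_lt (b :: t') (by simp)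
        have hlenp : ((b :: t').eraseIdx (pvPick (b :: t'))).length = t'.length := by
            rw [List.length_eraseIdx, if_pos hpick]; simp
        cases j with
        | zero =>
          -- candidate: delete a, i.e. keep b :: t'
          have h0 : pvMsval t' ≤ pvMsval ((b :: t').eraseIdx (pvPick (b :: t'))) := by
            have := ih htl 0 (by simp)
            simpa using this
          have hp : (0:Int) < 10 ^ t'.length := by positivity
          simp only [List.eraseIdx_zero, List.tail_cons, pvMsval, hlenp]
          nlinarith
        | succ k =>
          have hk : k < (b :: t').length := by simpa using hj
          have := ih htl k hk
          have hlenk : ((b :: t').eraseIdx k).length = t'.length := by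
            rw [List.length_eraseIdx, if_pos hk]; simp
          simp only [List.eraseIdx_cons_succ, pvMsval, hlenp, hlenk]
          omega

lemma pvFoldl_max_le (xs : List Int) : ∀ a c : Int, a ≤ c → (∀ x ∈ xs, x ≤ c) → xs.foldl max a ≤ c := by
  induction xs with
  | nil => intro a c ha _; simpa using ha
  | cons x t ih =>
    intro a c ha hub
    simp only [List.foldl_cons]
    exact ih _ c (max_le ha (hub x (by simp))) (fun y hy => hub y (by simp [hy]))

lemma pvMaxl_eq_of (xs : List Int) (c : Int) (hmem : c ∈ xs) (hc : 0 ≤ c)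
    (hub : ∀ x ∈ xs, x ≤ c) : pvMaxl xs = c := by
  refine le_antisymm (pvFoldl_max_le xs 0 c hc hub) ?_
  exact (PySem.List.le_foldl_max xs 0).2 c hmem

lemma pvMsval_append_singleton (xs : List Int) (r : Int) :
    pvMsval (xs ++ [r]) = 10 * pvMsval xs + r := by
  induction xs with
  | nil => simp [pvMsval]
  | cons x t ih =>
    simp only [List.cons_append, pvMsval, ih, List.length_append, List.length_cons,
      List.length_nil, pow_succ]
    ring

lemma pvDigitsRev_pos {n : Int} (h : 0 < n) :
    pvDigitsRev n = n % 10 :: pvDigitsRev (n / 10) := by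
  rw [pvDigitsRev, dif_pos h, PySem.Int.mod_eq_emod_of_pos (by omega),
    PySem.Int.floordiv_eq_ediv_of_pos (by omega)]

lemma pvDiv10_lt {n : Int} (h : 0 < n) : n / 10 < n ∧ 0 ≤ n / 10 := by
  constructor
  · rw [Int.ediv_lt_iff_lt_mul (by omega)]; nlinarith
  · exact Int.ediv_nonneg (by omega) (by omega)

lemma pvOkd_digitsRev : ∀ (k : Nat) (n : Int), n.toNat = k → pvOkd (pvDigitsRev n) := by
  intro k
  induction k using Nat.strong_induction_on with
  | _ k ih =>
    intro n hk
    by_cases h : 0 < n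
    · rw [pvDigitsRev_pos h]
      intro d hd
      rcases List.mem_cons.mp hd with rfl | hd
      · exact ⟨Int.emod_nonneg n (by omega), Int.emod_lt_of_pos n (by omega)⟩
      · have hq := pvDiv10_lt h
        exact ih (n / 10).toNat (by omega) (n / 10) rfl d hd
    · rw [pvDigitsRev, dif_neg h]; intro d hd; simp at hd

lemma pvMsval_digits : ∀ (k : Nat) (n : Int), n.toNat = k → 0 ≤ n → pvMsval (pvDigitsRev n).reverse = n := by
  intro k
  induction k using Nat.strong_induction_on with
  | _ k ih =>
    intro n hk hn
    by_cases h : 0 < n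
    · have hq := pvDiv10_lt h
      rw [pvDigitsRev_pos h, List.reverse_cons, pvMsval_append_singleton,
        ih (n / 10).toNat (by omega) (n / 10) rfl hq.2]
      omega
    · have hn0 : n = 0 := by omega
      subst hn0
      rw [pvDigitsRev, dif_neg h]
      simp [pvMsval]

lemma pvFoldl_max_affine (xs : List Int) (r : Int) :
    ∀ a : Int, (xs.map fun x => 10 * x + r).foldl max (10 * a + r) = 10 * xs.foldl max a + r := by
  induction xs with
  | nil => intro a; simp
  | cons x t ih => intro a; simp only [List.map_cons, List.foldl_cons, ← pvMax_affine, ih]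

lemma pvMaxl_map_affine (z : Int) (zs : List Int) (r : Int) (hz : 0 ≤ z) (hr : 0 ≤ r) :
    pvMaxl ((z :: zs).map fun x => 10 * x + r) = 10 * pvMaxl (z :: zs) + r := by
  simp only [pvMaxl, List.map_cons, List.foldl_cons]
  rw [max_eq_right (by omega : (0:Int) ≤ 10 * z + r), max_eq_right hz, pvFoldl_max_affine]

lemma pvMaxl_append_singleton (ys : List Int) (v : Int) :
    pvMaxl (ys ++ [v]) = max (pvMaxl ys) v := by
  simp [pvMaxl, List.foldl_append]

lemma pvCands_append_singleton (ds' : List Int) (r : Int) :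
    pvCands (ds' ++ [r]) =
      ((pvCands ds').map fun x => 10 * x + r) ++ [pvVal ds'] := by
  unfold pvCands
  rw [List.length_append, List.length_cons, List.length_nil, List.range_succ, List.map_append]
  congr 1
  · rw [List.map_map]
    refine List.map_eq_map_iff.mpr ?_
    intro j hj
    have hj' : j < ds'.length := List.mem_range.mp hj
    simp only [Function.comp_apply]
    rw [List.eraseIdx_append_of_lt_length hj', pvVal_eq_msval, pvVal_eq_msval,
      pvMsval_append_singleton]
  · simp only [List.map_cons, List.map_nil, List.cons.injEq, and_true]
    rw [List.eraseIdx_append_of_length_le (le_refl _)]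
    simp

lemma pvOkd_reverse (l : List Int) (h : pvOkd l) : pvOkd l.reverse := by
  intro d hd; exact h d (List.mem_reverse.mp hd)

lemma pvCands_nonneg (ds : List Int) (h : pvOkd ds) : ∀ x ∈ pvCands ds, 0 ≤ x := by
  intro x hx
  obtain ⟨j, _, rfl⟩ := List.mem_map.mp hx
  rw [pvVal_eq_msval]
  exact pvMsval_nonneg _ (pvOkd_eraseIdx ds h j)

lemma pvMaxl_cands_eq_M : ∀ (k : Nat) (n : Int), n.toNat = k → 0 < n →
    pvMaxl (pvCands (pvDigitsRev n).reverse) = pvM n := by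
  intro k
  induction k using Nat.strong_induction_on with
  | _ k ih =>
    intro n hk hn
    have hq := pvDiv10_lt hn
    by_cases h10 : 10 ≤ n
    · -- at least two digits
      have hq1 : 1 ≤ n / 10 := by omega
      set ds' := (pvDigitsRev (n / 10)).reverse with hds'
      have hds : (pvDigitsRev n).reverse = ds' ++ [n % 10] := by
        rw [pvDigitsRev_pos hn, List.reverse_cons]
      have hne : ds' ≠ [] := by
        rw [hds', pvDigitsRev_pos (by omega : 0 < n / 10)]
        simp
      have hokd' : pvOkd ds' := pvOkd_reverse _ (pvOkd_digitsRev _ (n / 10) rfl)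
      have hval' : pvVal ds' = n / 10 := by
        rw [pvVal_eq_msval, hds', pvMsval_digits _ (n / 10) rfl hq.2]
      have hcne : pvCands ds' ≠ [] := by
        have hlen : (pvCands ds').length = ds'.length := by simp [pvCands]
        intro hc
        rw [hc] at hlen
        exact hne (List.eq_nil_of_length_eq_zero hlen.symm)
      obtain ⟨z, zs, hzzs⟩ := List.exists_cons_of_ne_nil hcne
      have hz0 : 0 ≤ z := pvCands_nonneg ds' hokd' z (by rw [hzzs]; simp)
      rw [hds, pvCands_append_singleton, pvMaxl_append_singleton, hzzs,
        pvMaxl_map_affine z zs (n % 10) hz0 (by omega), ← hzzs,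
        ih (n / 10).toNat (by omega) (n / 10) rfl (by omega), hval']
      conv_rhs => rw [pvM]
      rw [dif_pos h10]
      exact max_comm _ _
    · -- single digit: 0 < n < 10
      have hd0 : n / 10 = 0 := by omega
      have hm : n % 10 = n := by omega
      rw [pvDigitsRev_pos hn, hd0, pvDigitsRev, dif_neg (by omega), hm]
      rw [pvM, dif_neg h10]
      simp [pvCands, pvVal, pvMaxl, List.range_succ]

lemma pvAlt_eq_M (n : Int) : maxNumber_after_one_deletion_alt n = pvM n := by
  unfold maxNumber_after_one_deletion_alt
  by_cases h : n < 10
  · rw [if_pos h, pvM, dif_neg (by omega)]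
  · rw [if_neg h]
    have hn : 0 < n := by omega
    set ds := (pvDigitsRev n).reverse with hds
    have hokd : pvOkd ds := pvOkd_reverse _ (pvOkd_digitsRev _ n rfl)
    have hne : ds ≠ [] := by
      rw [hds, pvDigitsRev_pos hn]; simp
    have hpick := pvPick_lt ds hne
    rw [← pvMaxl_cands_eq_M _ n rfl hn, ← hds]
    refine (pvMaxl_eq_of _ _ ?_ ?_ ?_).symm
    · exact List.mem_map.mpr ⟨pvPick ds, List.mem_range.mpr hpick, rfl⟩
    · rw [pvVal_eq_msval]
      exact pvMsval_nonneg _ (pvOkd_eraseIdx ds hokd _)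
    · intro x hx
      obtain ⟨j, hj, rfl⟩ := List.mem_map.mp hx
      rw [pvVal_eq_msval, pvVal_eq_msval]
      exact pvGreedy_ge ds hokd j (List.mem_range.mp hj)

-- ===== VERDICT (by name: the statement is the Claim_ definition above) =====
theorem maxNumber_after_one_deletion_spec : Claim_equal_maxNumber_after_one_deletion := by
  intro n _
  unfold Spec_maxNumber_after_one_deletion
  rw [pvAlt_eq_M]
  show pvLoopA n 0 1 = pvM n
  rw [pvLoopA_eq_camax n _ 1 0 rfl (le_refl 0), pvCamax_eq_M _ n rfl]
  have : 0 ≤ pvM n := by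
    rw [pvM]; split_ifs with h
    · have : 0 ≤ n / 10 := Int.ediv_nonneg (by omega) (by omega)
      exact le_trans this (le_max_left _ _)
    · exact le_refl 0
  omega
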